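-- pv_equiv track=rewrite | github.com/manitawtani74/diabetes-drl | app/engine/csv_loader.py | _detect_dexcom_columns
-- ===== SOURCE A (Python) =====
-- from typing import List, Optional, Tuple, Iterable
--
-- def _detect_dexcom_columns(normalized_headers: dict, original_headers: List[str]) -> Tuple[Optional[str], Optional[str]]:
--     """Detect Dexcom Clarity format columns."""
--     timestamp_col = None
--     glucose_col = None
--
--     # Find timestamp column - Dexcom uses various formats
--     # Priority: "timestamp" > "event time" > "date" + "time" > anything with "time"
--     timestamp_candidates = []
--     for norm, orig in normalized_headers.items():
--         if norm == "timestamp":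
--             timestamp_candidates.insert(0, orig)  # Highest priority
--         elif "event time" in norm or "eventtime" in norm:
--             timestamp_candidates.insert(1 if len(timestamp_candidates) > 0 else 0, orig)
--         elif "timestamp" in norm:
--             timestamp_candidates.append(orig)
--         elif ("date" in norm and "time" in norm) or norm == "time":
--             timestamp_candidates.append(orig)
--
--     if timestamp_candidates:
--         timestamp_col = timestamp_candidates[0]
--
--     # Find glucose column - Dexcom uses various glucose column names
--     # Priority: "glucose value (mg/dl)" > "sensor glucose (mg/dl)" > "glucose" with "mg/dl"
--     glucose_candidates = []
--     for norm, orig in normalized_headers.items():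
--         if "glucose value" in norm and "mg/dl" in norm:
--             glucose_candidates.insert(0, orig)  # Highest priority
--         elif "sensor glucose" in norm and "mg/dl" in norm:
--             glucose_candidates.insert(1 if len(glucose_candidates) > 0 else 0, orig)
--         elif "glucose" in norm and "mg/dl" in norm:
--             glucose_candidates.append(orig)
--         elif norm == "glucose" or norm == "glucose value":
--             # Sometimes mg/dL is in a separate unit column or implied
--             glucose_candidates.append(orig)
--
--     if glucose_candidates:
--         glucose_col = glucose_candidates[0]
--
--     return timestamp_col, glucose_col
-- ===== SOURCE B (Python) =====
-- from typing import List, Optional, Tuple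
--
--
-- def _ts_match(norm: str) -> bool:
--     return ("event time" in norm or "eventtime" in norm or "timestamp" in norm
--             or ("date" in norm and "time" in norm) or norm == "time")
--
--
-- def _gl_match(norm: str) -> bool:
--     return (("sensor glucose" in norm and "mg/dl" in norm)
--             or ("glucose" in norm and "mg/dl" in norm)
--             or norm in ("glucose", "glucose value"))
--
--
-- def _detect_dexcom_columns(normalized_headers: dict, original_headers: List[str]) -> Tuple[Optional[str], Optional[str]]:
--     """Detect Dexcom Clarity format columns by direct selection."""
--     if "timestamp" in normalized_headers:
--         timestamp_col = normalized_headers["timestamp"]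
--     else:
--         timestamp_col = next(
--             (orig for norm, orig in normalized_headers.items() if _ts_match(norm)), None)
--
--     glucose_col = next(
--         (orig for norm, orig in normalized_headers.items()
--          if "glucose value" in norm and "mg/dl" in norm), None)
--     if glucose_col is None:
--         glucose_col = next(
--             (orig for norm, orig in normalized_headers.items() if _gl_match(norm)), None)
--     return timestamp_col, glucose_col
-- ===== Notes on version B (the rewrite author's own statement) =====
-- stated objective: simpler
-- what changed: Replaces A's two priority-insert candidate-list loops (positional insert(0)/insert(1)/append then take element 0) by direct selection: dict lookup or first matching header for the timestamp, and the first top-priority 'glucose value ... mg/dl' header (else first matching header) for glucose; Pre_ excludes association lists with duplicate normalized keys, which a Python dict cannot represent.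
-- intended difference: On headers containing two or more 'glucose value ... mg/dl' columns with different original names, A returns the LAST such column (an accident of its repeated insert(0)), while B returns the FIRST one in header order, which is the intended highest-priority selection. — e.g. on _detect_dexcom_columns([("glucose value (mg/dl)", "First GV"), ("glucose value (mg/dl) b", "Second GV")], []): A returns (none, some "Second GV"), B returns (none, some "First GV")
import Mathlib
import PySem

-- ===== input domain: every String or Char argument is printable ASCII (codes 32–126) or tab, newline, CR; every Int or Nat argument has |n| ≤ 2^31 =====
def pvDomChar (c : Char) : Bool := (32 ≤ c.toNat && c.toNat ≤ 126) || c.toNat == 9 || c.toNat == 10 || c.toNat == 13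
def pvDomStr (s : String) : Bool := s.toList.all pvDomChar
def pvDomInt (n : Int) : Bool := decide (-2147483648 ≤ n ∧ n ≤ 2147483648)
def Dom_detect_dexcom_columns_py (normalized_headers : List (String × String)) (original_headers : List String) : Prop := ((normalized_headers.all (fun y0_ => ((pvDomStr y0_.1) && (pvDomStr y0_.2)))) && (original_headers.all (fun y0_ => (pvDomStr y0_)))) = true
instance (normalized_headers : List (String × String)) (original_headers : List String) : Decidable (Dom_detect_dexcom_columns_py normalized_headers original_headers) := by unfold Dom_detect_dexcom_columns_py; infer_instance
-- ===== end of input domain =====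

-- B replaces A's two priority-insert candidate-list loops by direct selection (lookup /
-- first matching header per priority tier); objective: simpler, same asymptotic cost.

-- ===== PORT A =====
-- one iteration of A's first loop (the elif chain building timestamp_candidates)
def pvTsStep (c : List String) (p : String × String) : List String :=
  if p.1 == "timestamp" then PySem.List.insert c 0 p.2
  else if PySem.Str.isIn "event time" p.1 || PySem.Str.isIn "eventtime" p.1 then
    PySem.List.insert c (if c.length > 0 then 1 else 0) p.2
  else if PySem.Str.isIn "timestamp" p.1 then c ++ [p.2]
  else if (PySem.Str.isIn "date" p.1 && PySem.Str.isIn "time" p.1) || p.1 == "time" then c ++ [p.2]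
  else c

-- one iteration of A's second loop (the elif chain building glucose_candidates)
def pvGlStep (c : List String) (p : String × String) : List String :=
  if PySem.Str.isIn "glucose value" p.1 && PySem.Str.isIn "mg/dl" p.1 then PySem.List.insert c 0 p.2
  else if PySem.Str.isIn "sensor glucose" p.1 && PySem.Str.isIn "mg/dl" p.1 then
    PySem.List.insert c (if c.length > 0 then 1 else 0) p.2
  else if PySem.Str.isIn "glucose" p.1 && PySem.Str.isIn "mg/dl" p.1 then c ++ [p.2]
  else if p.1 == "glucose" || p.1 == "glucose value" then c ++ [p.2]
  else c

def detect_dexcom_columns_py (normalized_headers : List (String × String)) (original_headers : List String) : Option String × Option String :=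
  let timestamp_candidates := normalized_headers.foldl pvTsStep []
  -- "if timestamp_candidates: timestamp_col = timestamp_candidates[0]"
  let timestamp_col := timestamp_candidates.head?
  let glucose_candidates := normalized_headers.foldl pvGlStep []
  let glucose_col := glucose_candidates.head?
  (timestamp_col, glucose_col)

-- ===== PORT B =====
def pvTsMatch (n : String) : Bool :=
  PySem.Str.isIn "event time" n || PySem.Str.isIn "eventtime" n || PySem.Str.isIn "timestamp" n ||
  (PySem.Str.isIn "date" n && PySem.Str.isIn "time" n) || n == "time"

def pvGlMatch (n : String) : Bool :=
  (PySem.Str.isIn "sensor glucose" n && PySem.Str.isIn "mg/dl" n) ||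
  (PySem.Str.isIn "glucose" n && PySem.Str.isIn "mg/dl" n) ||
  n == "glucose" || n == "glucose value"

def pvGvTop (n : String) : Bool := PySem.Str.isIn "glucose value" n && PySem.Str.isIn "mg/dl" n

def detect_dexcom_columns_py_alt (normalized_headers : List (String × String)) (original_headers : List String) : Option String × Option String :=
  -- if "timestamp" in normalized_headers: take it; else first header matching any timestamp rule
  let timestamp_col :=
    match normalized_headers.find? (fun p => p.1 == "timestamp") with
    | some q => some q.2
    | none => (normalized_headers.find? (fun p => pvTsMatch p.1)).map Prod.snd
  -- first top-priority "glucose value … mg/dl" header if any, else first matching header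
  let glucose_col :=
    match normalized_headers.find? (fun p => pvGvTop p.1) with
    | some q => some q.2
    | none => (normalized_headers.find? (fun p => pvGlMatch p.1)).map Prod.snd
  (timestamp_col, glucose_col)

-- ===== PRECONDITION & SPEC =====
-- Pre_ excludes association lists with duplicate normalized keys: a Python dict cannot
-- represent them (duplicates collapse to the last value at dict construction).
def Pre_detect_dexcom_columns_py (normalized_headers : List (String × String)) (original_headers : List String) : Prop :=
  (normalized_headers.map Prod.fst).Nodup
instance (normalized_headers : List (String × String)) (original_headers : List String) : Decidable (Pre_detect_dexcom_columns_py normalized_headers original_headers) := by unfold Pre_detect_dexcom_columns_py; infer_instance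

def pvWitness_detect_dexcom_columns_py : (List (String × String)) × List String :=
  ([("timestamp", "Timestamp"), ("glucose value (mg/dl)", "Glucose Value (mg/dL)")],
   ["Timestamp", "Glucose Value (mg/dL)"])

-- On headers with two or more top-priority "glucose value … mg/dl" columns whose original
-- names differ, A returns the LAST such column (an accident of its repeated insert(0));
-- B returns the FIRST one in header order, the intended highest-priority selection.
-- a normalized key naming the top-priority glucose column: contains both substrings
def pvIsGvTopKey (n : String) : Bool :=
  decide ("glucose value".toList <:+: n.toList ∧ "mg/dl".toList <:+: n.toList)

def D_detect_dexcom_columns_py (normalized_headers : List (String × String)) (original_headers : List String) : Prop :=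
  ((normalized_headers.filter (fun p => pvIsGvTopKey p.1)).head?.map Prod.snd) ≠
  ((normalized_headers.filter (fun p => pvIsGvTopKey p.1)).getLast?.map Prod.snd)
instance (normalized_headers : List (String × String)) (original_headers : List String) : Decidable (D_detect_dexcom_columns_py normalized_headers original_headers) := by unfold D_detect_dexcom_columns_py; infer_instance

def Spec_detect_dexcom_columns_py (normalized_headers : List (String × String)) (original_headers : List String) (out : Option String × Option String) : Prop := ¬ D_detect_dexcom_columns_py normalized_headers original_headers → out = detect_dexcom_columns_py_alt normalized_headers original_headers
instance (normalized_headers : List (String × String)) (original_headers : List String) (out : Option String × Option String) : Decidable (Spec_detect_dexcom_columns_py normalized_headers original_headers out) := by unfold Spec_detect_dexcom_columns_py; infer_instance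

def pvDiffWitness_detect_dexcom_columns_py : (List (String × String)) × List String :=
  ([("glucose value (mg/dl)", "First GV"), ("glucose value (mg/dl) b", "Second GV")], [])

def pvDiffWitnessOut_detect_dexcom_columns_py : (Option String × Option String) × (Option String × Option String) :=
  ((none, some "Second GV"), (none, some "First GV"))

-- ===== CLAIM (what is proved, stated in full; the proofs are below) =====
def Claim_unchanged_detect_dexcom_columns_py : Prop := ∀ (normalized_headers : List (String × String)) (original_headers : List String), Dom_detect_dexcom_columns_py normalized_headers original_headers → Pre_detect_dexcom_columns_py normalized_headers original_headers → Spec_detect_dexcom_columns_py normalized_headers original_headers (detect_dexcom_columns_py normalized_headers original_headers)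

def Claim_changed_detect_dexcom_columns_py : Prop := Dom_detect_dexcom_columns_py (pvDiffWitness_detect_dexcom_columns_py.1) (pvDiffWitness_detect_dexcom_columns_py.2) ∧ Pre_detect_dexcom_columns_py (pvDiffWitness_detect_dexcom_columns_py.1) (pvDiffWitness_detect_dexcom_columns_py.2) ∧ D_detect_dexcom_columns_py (pvDiffWitness_detect_dexcom_columns_py.1) (pvDiffWitness_detect_dexcom_columns_py.2) ∧ detect_dexcom_columns_py (pvDiffWitness_detect_dexcom_columns_py.1) (pvDiffWitness_detect_dexcom_columns_py.2) = pvDiffWitnessOut_detect_dexcom_columns_py.1 ∧ detect_dexcom_columns_py_alt (pvDiffWitness_detect_dexcom_columns_py.1) (pvDiffWitness_detect_dexcom_columns_py.2) = pvDiffWitnessOut_detect_dexcom_columns_py.2 ∧ pvDiffWitnessOut_detect_dexcom_columns_py.1 ≠ pvDiffWitnessOut_detect_dexcom_columns_py.2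

def Claim_exact_detect_dexcom_columns_py : Prop := ∀ (normalized_headers : List (String × String)) (original_headers : List String), Dom_detect_dexcom_columns_py normalized_headers original_headers → Pre_detect_dexcom_columns_py normalized_headers original_headers → D_detect_dexcom_columns_py normalized_headers original_headers → detect_dexcom_columns_py normalized_headers original_headers ≠ detect_dexcom_columns_py_alt normalized_headers original_headers

-- ===== LEMMAS AND PROOFS =====

-- head? and non-emptiness of one matching, non-exact timestamp step
theorem tsStep_head (c : List String) (p : String × String)
    (h : (p.1 == "timestamp") = false) (hm : pvTsMatch p.1 = true) :
    (pvTsStep c p).head? = (if c = [] then some p.2 else c.head?) ∧ pvTsStep c p ≠ [] := by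
  unfold pvTsStep
  unfold pvTsMatch at hm
  rcases c with _ | ⟨x, cs⟩
  · cases h1 : PySem.Str.isIn "event time" p.1 <;>
    cases h2 : PySem.Str.isIn "eventtime" p.1 <;>
    cases h3 : PySem.Str.isIn "timestamp" p.1 <;>
    cases h4 : (PySem.Str.isIn "date" p.1 && PySem.Str.isIn "time" p.1) <;>
    cases h5 : (p.1 == "time") <;>
    simp_all [PySem.List.insert_zero]
  · cases h1 : PySem.Str.isIn "event time" p.1 <;>
    cases h2 : PySem.Str.isIn "eventtime" p.1 <;>
    cases h3 : PySem.Str.isIn "timestamp" p.1 <;>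
    cases h4 : (PySem.Str.isIn "date" p.1 && PySem.Str.isIn "time" p.1) <;>
    cases h5 : (p.1 == "time") <;>
    simp_all [PySem.List.insert_ofNat (x :: cs) 1 p.2 (by simp)]

theorem tsStep_skip (c : List String) (p : String × String)
    (h : (p.1 == "timestamp") = false) (hm : pvTsMatch p.1 = false) :
    pvTsStep c p = c := by
  unfold pvTsStep
  unfold pvTsMatch at hm
  cases h1 : PySem.Str.isIn "event time" p.1 <;>
  cases h2 : PySem.Str.isIn "eventtime" p.1 <;>
  cases h3 : PySem.Str.isIn "timestamp" p.1 <;>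
  cases h4 : (PySem.Str.isIn "date" p.1 && PySem.Str.isIn "time" p.1) <;>
  cases h5 : (p.1 == "time") <;>
  simp_all

-- A's first loop, on a segment containing no exact "timestamp" key
theorem ts_fold_noexact (l : List (String × String))
    (h : ∀ p ∈ l, (p.1 == "timestamp") = false) (c : List String) :
    (l.foldl pvTsStep c).head? =
      if c = [] then (l.find? (fun p => pvTsMatch p.1)).map Prod.snd else c.head? := by
  induction l generalizing c with
  | nil => simp
  | cons p l ih =>
    have hp : (p.1 == "timestamp") = false := h p (by simp)
    have hl : ∀ q ∈ l, (q.1 == "timestamp") = false := fun q hq => h q (by simp [hq])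
    rw [List.foldl_cons, List.find?_cons]
    cases hm : pvTsMatch p.1 with
    | false =>
      rw [tsStep_skip c p hp hm, ih hl c]
    | true =>
      rcases tsStep_head c p hp hm with ⟨h1, h2⟩
      rw [ih hl (pvTsStep c p), if_neg h2, h1]
      by_cases hc : c = [] <;> simp [hc]

-- A's first loop under distinct keys, against B's direct selection
theorem ts_fold (l : List (String × String)) (hnd : (l.map Prod.fst).Nodup) (c : List String) :
    (l.foldl pvTsStep c).head? =
      match l.find? (fun p => p.1 == "timestamp") with
      | some q => some q.2
      | none => if c = [] then (l.find? (fun p => pvTsMatch p.1)).map Prod.snd else c.head? := by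
  induction l generalizing c with
  | nil => simp
  | cons p l ih =>
    rw [List.map_cons, List.nodup_cons] at hnd
    rw [List.foldl_cons, List.find?_cons]
    cases he : (p.1 == "timestamp") with
    | true =>
      have hpe : p.1 = "timestamp" := by simpa using he
      have hstep : pvTsStep c p = p.2 :: c := by
        unfold pvTsStep; rw [if_pos he, PySem.List.insert_zero]
      have hl : ∀ q ∈ l, (q.1 == "timestamp") = false := by
        intro q hq
        have : q.1 ∈ l.map Prod.fst := List.mem_map_of_mem hq
        have : q.1 ≠ "timestamp" := fun hq1 => hnd.1 (by rw [← hpe] at hq1; rw [← hq1]; exact this)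
        simpa using this
      rw [hstep, ts_fold_noexact l hl (p.2 :: c)]
      simp
    | false =>
      cases hm : pvTsMatch p.1 with
      | false =>
        rw [tsStep_skip c p he hm, ih hnd.2 c, List.find?_cons]
        rw [hm]
      | true =>
        rcases tsStep_head c p he hm with ⟨h1, h2⟩
        rw [ih hnd.2 (pvTsStep c p), List.find?_cons, hm]
        cases hf : l.find? (fun q => q.1 == "timestamp") with
        | some q => simp
        | none =>
          simp only [if_neg h2, h1]
          by_cases hc : c = [] <;> simp [hc]

-- head? and non-emptiness of one matching, non-top glucose step
theorem glStep_head (c : List String) (p : String × String)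
    (h : pvGvTop p.1 = false) (hm : pvGlMatch p.1 = true) :
    (pvGlStep c p).head? = (if c = [] then some p.2 else c.head?) ∧ pvGlStep c p ≠ [] := by
  unfold pvGlStep
  unfold pvGvTop at h
  unfold pvGlMatch at hm
  rcases c with _ | ⟨x, cs⟩
  · cases hm0 : PySem.Str.isIn "mg/dl" p.1 <;>
    cases h1 : PySem.Str.isIn "sensor glucose" p.1 <;>
    cases h2 : PySem.Str.isIn "glucose" p.1 <;>
    cases h3 : (p.1 == "glucose") <;>
    cases h4 : (p.1 == "glucose value") <;>
    simp_all [PySem.List.insert_zero]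
  · cases hm0 : PySem.Str.isIn "mg/dl" p.1 <;>
    cases h1 : PySem.Str.isIn "sensor glucose" p.1 <;>
    cases h2 : PySem.Str.isIn "glucose" p.1 <;>
    cases h3 : (p.1 == "glucose") <;>
    cases h4 : (p.1 == "glucose value") <;>
    simp_all [PySem.List.insert_ofNat (x :: cs) 1 p.2 (by simp)]

theorem glStep_skip (c : List String) (p : String × String)
    (h : pvGvTop p.1 = false) (hm : pvGlMatch p.1 = false) :
    pvGlStep c p = c := by
  unfold pvGlStep
  unfold pvGvTop at h
  unfold pvGlMatch at hm
  cases hm0 : PySem.Str.isIn "mg/dl" p.1 <;>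
  cases h1 : PySem.Str.isIn "sensor glucose" p.1 <;>
  cases h2 : PySem.Str.isIn "glucose" p.1 <;>
  cases h3 : (p.1 == "glucose") <;>
  cases h4 : (p.1 == "glucose value") <;>
  simp_all

-- A's second loop: every top-priority hit is an insert at 0, so the LAST one is
-- candidates[0]; otherwise the first matching header
theorem gl_fold (l : List (String × String)) (c : List String) :
    (l.foldl pvGlStep c).head? =
      match (l.filter (fun p => pvGvTop p.1)).getLast? with
      | some q => some q.2
      | none => if c = [] then (l.find? (fun p => pvGlMatch p.1)).map Prod.snd else c.head? := by
  induction l generalizing c with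
  | nil => simp
  | cons p l ih =>
    rw [List.foldl_cons, List.filter_cons, List.find?_cons]
    cases ht : pvGvTop p.1 with
    | true =>
      have hstep : pvGlStep c p = p.2 :: c := by
        unfold pvGlStep
        unfold pvGvTop at ht
        rw [if_pos ht, PySem.List.insert_zero]
      rw [if_pos (by simp), hstep, ih (p.2 :: c)]
      cases hfl : (l.filter (fun p => pvGvTop p.1)) with
      | nil => simp
      | cons y ys =>
        rw [List.getLast?_cons_cons]
        cases hg : (y :: ys).getLast? with
        | none => simp at hg
        | some q => simp
    | false =>
      rw [if_neg (by simp)]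
      cases hm : pvGlMatch p.1 with
      | false => rw [glStep_skip c p ht hm, ih c]
      | true =>
        rcases glStep_head c p ht hm with ⟨h1, h2⟩
        rw [ih (pvGlStep c p)]
        cases hf : (l.filter (fun p => pvGvTop p.1)).getLast? with
        | some q => simp
        | none =>
          simp only [if_neg h2, h1]
          by_cases hc : c = [] <;> simp [hc]

-- the change-region key condition coincides with the ports' substring test
theorem gvTopKey_eq (p : String × String) : pvIsGvTopKey p.1 = pvGvTop p.1 := by
  have h : ∀ sub s : String, (decide (sub.toList <:+: s.toList)) = PySem.Str.isIn sub s := by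
    intro sub s
    cases hs : PySem.Str.isIn sub s
    · have hni : ¬ (sub.toList <:+: s.toList) := fun hin => by
        rw [(PySem.Str.isIn_iff_infix sub s).mpr hin] at hs; cases hs
      simp [hni]
    · simp [(PySem.Str.isIn_iff_infix sub s).mp hs]
  unfold pvIsGvTopKey pvGvTop
  rw [Bool.decide_and, h, h]

-- B's top-priority find? as the head of the filtered list
theorem find?_eq_head_filter (l : List (String × String)) :
    l.find? (fun p => pvGvTop p.1) = (l.filter (fun p => pvGvTop p.1)).head? := by
  induction l with
  | nil => simp
  | cons p l ih =>
    rw [List.find?_cons, List.filter_cons]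
    cases ht : pvGvTop p.1 with
    | true => simp
    | false => simp only [Bool.false_eq_true, if_false]; exact ih

-- ===== VERDICT (by name: the statement is the Claim_ definition above) =====
theorem detect_dexcom_columns_py_spec : Claim_unchanged_detect_dexcom_columns_py := by
  intro nh oh _ hpre
  intro hD
  unfold D_detect_dexcom_columns_py at hD
  rw [not_ne_iff] at hD
  simp only [show (fun p : String × String => pvIsGvTopKey p.1) = (fun p => pvGvTop p.1) from funext gvTopKey_eq] at hD
  unfold detect_dexcom_columns_py detect_dexcom_columns_py_alt
  rw [Prod.mk.injEq]
  refine ⟨?_, ?_⟩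
  · rw [ts_fold nh hpre []]
    cases nh.find? (fun p => p.1 == "timestamp") <;> simp
  · rw [gl_fold nh [], find?_eq_head_filter nh]
    cases hl : (nh.filter (fun p => pvGvTop p.1)).getLast? with
    | none =>
      have : nh.filter (fun p => pvGvTop p.1) = [] := by simpa using hl
      simp [this]
    | some q =>
      rw [hl] at hD
      cases hh : (nh.filter (fun p => pvGvTop p.1)).head? with
      | none =>
        have : nh.filter (fun p => pvGvTop p.1) = [] := by simpa using hh
        rw [this] at hl; simp at hl
      | some r =>
        rw [hh] at hD
        simp at hD ⊢
        exact hD.symm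

theorem detect_dexcom_columns_py_changed : Claim_changed_detect_dexcom_columns_py := by
  unfold Claim_changed_detect_dexcom_columns_py; decide

theorem detect_dexcom_columns_py_tight : Claim_exact_detect_dexcom_columns_py := by
  intro nh oh _ hpre hD heq
  unfold D_detect_dexcom_columns_py at hD
  simp only [show (fun p : String × String => pvIsGvTopKey p.1) = (fun p => pvGvTop p.1) from funext gvTopKey_eq] at hD ⊢
  apply hD
  have hgl : (detect_dexcom_columns_py nh oh).2 = (detect_dexcom_columns_py_alt nh oh).2 := by
    rw [heq]
  unfold detect_dexcom_columns_py detect_dexcom_columns_py_alt at hgl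
  simp only at hgl
  rw [gl_fold nh [], find?_eq_head_filter nh] at hgl
  cases hl : (nh.filter (fun p => pvGvTop p.1)).getLast? with
  | none =>
    have : nh.filter (fun p => pvGvTop p.1) = [] := by simpa using hl
    simp [this]
  | some q =>
    rw [hl] at hgl
    cases hh : (nh.filter (fun p => pvGvTop p.1)).head? with
    | none =>
      have : nh.filter (fun p => pvGvTop p.1) = [] := by simpa using hh
      rw [this] at hl; simp at hl
    | some r =>
      rw [hh] at hgl
      simp at hgl ⊢
      exact hgl.symm
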